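-- pv_equiv track=rewrite | github.com/thereal1024/advent_of_code | 2020/20/solution-secondary.py | gettile
-- ===== SOURCE A (Python) =====
-- def gettile(tiles, spec):
--     idn, (fy, fx), rot = spec
--     tile = tiles[idn]
--
--     tilemod = [row[1:-1] for row in tile[1:-1]]
--
--     if fy:
--         tilemod = tilemod[::-1]
--     if fx:
--         tilemod = [row[::-1] for row in tilemod]
--
--     for _ in range(rot):
--         tilemod = list(reversed(list(map(lambda x: ''.join(x), zip(*tilemod)))))
--
--     return tilemod
-- ===== SOURCE B (Python) =====
-- def gettile(tiles, spec):
--     idn, (fy, fx), rot = spec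
--     grid = [row[1:-1] for row in tiles[idn][1:-1]]
--     if fy:
--         grid = grid[::-1]
--     if fx:
--         grid = [row[::-1] for row in grid]
--     if rot <= 0:
--         return grid
--     # one transpose-and-reverse pass (a quarter turn); it also squares up the grid,
--     # so every further quarter turn is a pure index permutation of period 4
--     grid = [''.join(col) for col in zip(*grid)][::-1]
--     n = len(grid)
--     m = len(grid[0]) if grid else 0
--     r = (rot - 1) % 4
--     if r == 0:
--         return grid
--     if r == 1:
--         return [''.join(grid[j][m - 1 - i] for j in range(n)) for i in range(m)]
--     if r == 2:
--         return [''.join(grid[n - 1 - i][m - 1 - j] for j in range(m)) for i in range(n)]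
--     return [''.join(grid[n - 1 - j][i] for j in range(n)) for i in range(m)]
-- ===== Notes on version B (the rewrite author's own statement) =====
-- stated objective: alternative
-- what changed: A applies the whole-grid transpose-and-reverse pass rot times in a loop; B does that pass once (after which the grid is rectangular) and collapses the remaining rot-1 quarter turns mod 4 into a single index-mapped build of the output, so no rotation loop remains. Pre_ only excludes a tile id missing from the dict, where A raises KeyError.
import Mathlib
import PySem

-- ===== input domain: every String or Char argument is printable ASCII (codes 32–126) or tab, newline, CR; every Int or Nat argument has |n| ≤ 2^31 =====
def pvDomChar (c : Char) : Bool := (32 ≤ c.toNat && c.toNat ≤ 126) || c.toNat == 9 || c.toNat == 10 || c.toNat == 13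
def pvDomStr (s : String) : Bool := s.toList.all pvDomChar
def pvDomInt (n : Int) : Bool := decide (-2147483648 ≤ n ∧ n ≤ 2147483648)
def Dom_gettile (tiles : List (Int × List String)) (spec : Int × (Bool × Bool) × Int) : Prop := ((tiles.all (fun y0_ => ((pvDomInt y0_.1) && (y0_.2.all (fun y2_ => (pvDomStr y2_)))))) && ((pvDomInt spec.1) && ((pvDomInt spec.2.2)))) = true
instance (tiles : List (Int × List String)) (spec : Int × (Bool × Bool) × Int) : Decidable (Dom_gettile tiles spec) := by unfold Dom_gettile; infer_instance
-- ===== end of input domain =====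

-- B replaces A's loop of rot whole-grid transpose-and-reverse passes by one such pass
-- followed by a single index-mapped build of the remaining (rot-1) % 4 quarter turns.

-- ===== PORT A =====
-- the crop [row[1:-1] for row in tile[1:-1]] is this line of both Python sources
def pvCrop (tile : List String) : List String :=
  (PySem.List.slice tile (some 1) (some (-1))).map
    (fun row => PySem.Str.slice row (some 1) (some (-1)))

-- the pass list(reversed(list(map(lambda x: ''.join(x), zip(*g))))), verbatim in both sources;
-- zip(*g) yields, for i below the minimum row length, the tuple of the i-th chars of the rows
def pvRotA (g : List String) : List String :=
  let ls := g.map String.toList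
  let m := PySem.List.minD (ls.map List.length) (fun x => x) 0
  ((List.range m).map (fun i => String.ofList (ls.map (fun r => r.getD i ' ')))).reverse

def gettile (tiles : List (Int × List String)) (spec : Int × (Bool × Bool) × Int) : List String :=
  match (PySem.Dict.mk tiles).get? spec.1 with
  | none => []                           -- KeyError; excluded by Pre_gettile
  | some tile =>
    let t1 := pvCrop tile
    let t2 := if spec.2.1.1 then t1.reverse else t1
    let t3 := if spec.2.1.2 then t2.map (fun row => String.ofList row.toList.reverse) else t2
    pvRotA^[spec.2.2.toNat] t3

-- ===== PORT B =====
-- g[i][j] with indices known to be in range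
def pvChr (g : List String) (i j : Nat) : Char := ((g.getD i "").toList).getD j ' '

-- an h×w grid of strings given by a coordinate function (''.join over a range comprehension)
def pvMkG (h w : Nat) (f : Nat → Nat → Char) : List String :=
  (List.range h).map (fun i => String.ofList ((List.range w).map (f i)))

def gettile_alt (tiles : List (Int × List String)) (spec : Int × (Bool × Bool) × Int) : List String :=
  match (PySem.Dict.mk tiles).get? spec.1 with
  | none => []                           -- KeyError; excluded by Pre_gettile
  | some tile =>
    let g0 := pvCrop tile
    let g1 := if spec.2.1.1 then g0.reverse else g0
    let g2 := if spec.2.1.2 then g1.map (fun row => String.ofList row.toList.reverse) else g1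
    if spec.2.2 ≤ 0 then g2
    else
      let grid := pvRotA g2           -- one transpose-and-reverse pass (the same line of Python)
      let n := grid.length
      let m := if grid.isEmpty then 0 else (grid.headD "").toList.length
      let r := PySem.Int.mod (spec.2.2 - 1) 4
      if r = 0 then grid
      else if r = 1 then pvMkG m n (fun i j => pvChr grid j (m - 1 - i))
      else if r = 2 then pvMkG n m (fun i j => pvChr grid (n - 1 - i) (m - 1 - j))
      else pvMkG m n (fun i j => pvChr grid (n - 1 - j) i)

-- ===== PRECONDITION & SPEC =====
-- Pre_ excludes exactly the inputs on which tiles[idn] raises KeyError (idn not a key of tiles).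
def Pre_gettile (tiles : List (Int × List String)) (spec : Int × (Bool × Bool) × Int) : Prop :=
  spec.1 ∈ tiles.map Prod.fst
instance (tiles : List (Int × List String)) (spec : Int × (Bool × Bool) × Int) : Decidable (Pre_gettile tiles spec) := by unfold Pre_gettile; infer_instance

def pvWitness_gettile : (List (Int × List String)) × (Int × (Bool × Bool) × Int) :=
  ([(0, ["abcd", "efgh", "ijkl", "mnop"])], (0, (false, true), 5))

def Spec_gettile (tiles : List (Int × List String)) (spec : Int × (Bool × Bool) × Int) (out : List String) : Prop := out = gettile_alt tiles spec
instance (tiles : List (Int × List String)) (spec : Int × (Bool × Bool) × Int) (out : List String) : Decidable (Spec_gettile tiles spec out) := by unfold Spec_gettile; infer_instance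

-- ===== CLAIM (what is proved, stated in full; the proofs are below) =====
def Claim_equal_gettile : Prop := ∀ (tiles : List (Int × List String)) (spec : Int × (Bool × Bool) × Int), Dom_gettile tiles spec → Pre_gettile tiles spec → Spec_gettile tiles spec (gettile tiles spec)

-- ===== LEMMAS AND PROOFS =====

-- the minimum row length A's zip(*) truncates to
def pvMLen (g : List String) : Nat :=
  PySem.List.minD (g.map (fun r => r.toList.length)) (fun x => x) 0

theorem pvChr_mkG {h w : Nat} {f : Nat → Nat → Char} {i j : Nat} (hi : i < h) (hj : j < w) :
    pvChr (pvMkG h w f) i j = f i j := by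
  simp [pvChr, pvMkG, List.getD, hi, hj]

theorem pvMkG_congr {h w : Nat} {f f' : Nat → Nat → Char}
    (hf : ∀ i < h, ∀ j < w, f i j = f' i j) : pvMkG h w f = pvMkG h w f' := by
  unfold pvMkG
  refine List.map_congr_left (fun i hi => ?_)
  rw [List.mem_range] at hi
  congr 1
  exact List.map_congr_left (fun j hj => hf i hi j (by simpa using hj))

theorem getD_map_toList (g : List String) (j : Nat) :
    (g.map String.toList).getD j [] = (g.getD j "").toList := by
  simp [List.getD]; cases g[j]? <;> simp

theorem reverse_range_map {α : Type} (m : Nat) (f : Nat → α) :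
    ((List.range m).map f).reverse = (List.range m).map (fun i => f (m - 1 - i)) := by
  apply List.ext_getElem
  · simp
  · intro i h1 h2
    simp [List.getElem_reverse]

theorem map_eq_range_map {α β : Type} (l : List α) (f : α → β) (d : α) :
    l.map f = (List.range l.length).map (fun j => f (l.getD j d)) := by
  apply List.ext_getElem
  · simp
  · intro i h1 h2
    simp [List.getD, List.getElem?_eq_getElem (by simpa using h2)]

theorem pvMLen_eq (g : List String) :
    PySem.List.minD ((g.map String.toList).map List.length) (fun x => x) 0 = pvMLen g := by
  simp [pvMLen, List.map_map, Function.comp_def]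

theorem pvRotA_nil : pvRotA [] = [] := by rfl

-- one pass on an arbitrary (possibly ragged) grid, as an index-mapped grid
theorem pvRotA_eq (g : List String) :
    pvRotA g = pvMkG (pvMLen g) g.length (fun i j => pvChr g j (pvMLen g - 1 - i)) := by
  show ((List.range (PySem.List.minD ((g.map String.toList).map List.length) (fun x => x) 0)).map
      (fun i => String.ofList ((g.map String.toList).map (fun r => r.getD i ' ')))).reverse = _
  rw [pvMLen_eq, reverse_range_map]
  unfold pvMkG
  refine List.map_congr_left (fun i _ => ?_)
  congr 1
  rw [map_eq_range_map (g.map String.toList) _ []]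
  simp only [List.length_map]
  exact List.map_congr_left (fun j _ => by rw [getD_map_toList]; rfl)

theorem pvMLen_mkG {h w : Nat} (f : Nat → Nat → Char) (hh : 0 < h) :
    pvMLen (pvMkG h w f) = w := by
  have hmap : (pvMkG h w f).map (fun r => r.toList.length) = (List.range h).map (fun _ => w) := by
    simp [pvMkG, List.map_map, Function.comp_def]
  unfold pvMLen
  rw [hmap]
  rcases hm : PySem.List.min? ((List.range h).map (fun _ => w)) (fun x => x) with _ | m
  · rw [PySem.List.min?_eq_none_iff] at hm
    simp at hm
    omega
  · have := PySem.List.min?_mem hm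
    simp at this
    obtain ⟨_, _, rfl⟩ := this
    simp only [PySem.List.minD]
    rw [hm]
    rfl

-- one pass on a rectangular grid
theorem pvRotA_mkG {h w : Nat} (f : Nat → Nat → Char) (hh : 0 < h) :
    pvRotA (pvMkG h w f) = pvMkG w h (fun i j => f j (w - 1 - i)) := by
  rw [pvRotA_eq, pvMLen_mkG f hh]
  have hl : (pvMkG h w f).length = h := by simp [pvMkG]
  rw [hl]
  refine List.map_congr_left (fun i hi => ?_)
  rw [List.mem_range] at hi
  congr 1
  refine List.map_congr_left (fun j hj => ?_)
  rw [List.mem_range] at hj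
  exact pvChr_mkG hj (by omega)

-- period 4 on nonempty rectangular grids
theorem pvRotA_iterate4 (m n : Nat) (f : Nat → Nat → Char) (hm : 0 < m) (hn : 0 < n) :
    pvRotA^[4] (pvMkG m n f) = pvMkG m n f := by
  show pvRotA (pvRotA (pvRotA (pvRotA (pvMkG m n f)))) = pvMkG m n f
  rw [pvRotA_mkG f hm, pvRotA_mkG _ hn, pvRotA_mkG _ hm, pvRotA_mkG _ hn]
  exact pvMkG_congr (fun i hi j hj => by congr 1 <;> omega)

-- iteration count reduction mod 4 on nonempty rectangular grids
theorem pvRotA_mod (k m n : Nat) (f : Nat → Nat → Char) (hm : 0 < m) (hn : 0 < n) :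
    pvRotA^[k] (pvMkG m n f) = pvRotA^[k % 4] (pvMkG m n f) := by
  induction k using Nat.strong_induction_on with
  | _ k ih =>
    by_cases h4 : k < 4
    · rw [Nat.mod_eq_of_lt h4]
    · calc pvRotA^[k] (pvMkG m n f)
          = pvRotA^[k - 4] (pvRotA^[4] (pvMkG m n f)) := by
            rw [← Function.iterate_add_apply, show k - 4 + 4 = k from by omega]
        _ = pvRotA^[k - 4] (pvMkG m n f) := by rw [pvRotA_iterate4 m n f hm hn]
        _ = pvRotA^[(k - 4) % 4] (pvMkG m n f) := ih (k - 4) (by omega)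
        _ = pvRotA^[k % 4] (pvMkG m n f) := by rw [show (k - 4) % 4 = k % 4 from by omega]

-- a rectangular list of strings is the grid of its own characters
theorem grid_eq_mkG (g : List String) (m : Nat) (hg : ∀ row ∈ g, row.toList.length = m) :
    g = pvMkG g.length m (pvChr g) := by
  apply List.ext_getElem
  · simp [pvMkG]
  · intro i h1 h2
    simp only [pvMkG, List.getElem_map, List.getElem_range]
    apply String.toList_inj.mp
    have hm : (g[i]).toList.length = m := hg _ (List.getElem_mem _)
    apply List.ext_getElem
    · simpa using hm
    · intro j hj1 hj2
      simp only [String.toList_ofList, List.getElem_map, List.getElem_range]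
      simp only [pvChr, List.getD, List.getElem?_eq_getElem h1, Option.getD_some,
        List.getElem?_eq_getElem hj1, Option.getD_some]

-- ===== VERDICT (by name: the statement is the Claim_ definition above) =====
theorem gettile_spec : Claim_equal_gettile := by
  intro tiles spec _ _
  unfold Spec_gettile gettile gettile_alt
  rcases hget : (PySem.Dict.mk tiles).get? spec.1 with _ | tile
  · rfl
  · dsimp only
    set rot := spec.2.2
    set g2 := (if spec.2.1.2 then
        (if spec.2.1.1 then (pvCrop tile).reverse else pvCrop tile).map
          (fun row => String.ofList row.toList.reverse)
      else (if spec.2.1.1 then (pvCrop tile).reverse else pvCrop tile)) with hg2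
    by_cases hrot : rot ≤ 0
    · rw [if_pos hrot, Int.toNat_of_nonpos hrot]
      rfl
    · rw [if_neg hrot]
      -- A = pvRotA^[rot-1] (pvRotA g2); the first pass makes the grid rectangular
      have hA : pvRotA^[rot.toNat] g2 = pvRotA^[rot.toNat - 1] (pvRotA g2) := by
        conv_lhs => rw [show rot.toNat = rot.toNat - 1 + 1 from by omega,
          Function.iterate_succ_apply]
      rw [hA]
      set grid := pvRotA g2 with hgrid
      by_cases hmu : pvMLen g2 = 0
      · -- the pass collapsed the grid to []
        have hnil : grid = [] := by
          rw [hgrid, pvRotA_eq, hmu]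
          simp [pvMkG]
        rw [hnil, Function.iterate_fixed pvRotA_nil]
        simp only [List.isEmpty_nil, if_true]
        split_ifs <;> simp [pvMkG]
      · -- a nonempty rectangular grid of height μ and width g2.length
        have hmupos : 0 < pvMLen g2 := by omega
        have hLpos : 0 < g2.length := by
          rcases hL : g2 with _ | _
          · rw [hL] at hmu; exact absurd rfl hmu
          · simp
        have hG : grid = pvMkG (pvMLen g2) g2.length
            (fun i j => pvChr g2 j (pvMLen g2 - 1 - i)) := by
          rw [hgrid, pvRotA_eq]
        have hn : grid.length = pvMLen g2 := by rw [hG]; simp [pvMkG]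
        have hrect : ∀ row ∈ grid, row.toList.length = g2.length := by
          intro row hr
          rw [hG] at hr
          simp only [pvMkG, List.mem_map] at hr
          obtain ⟨i, _, rfl⟩ := hr
          simp
        have hgridne : grid ≠ [] := by
          intro h
          rw [h] at hn
          simp at hn
          omega
        have hisEmpty : grid.isEmpty = false := by
          simpa [List.isEmpty_iff] using hgridne
        have hheadm : (grid.headD "").toList.length = g2.length := by
          rcases hLg : grid with _ | ⟨r0, rt⟩
          · exact absurd hLg hgridne
          · exact hrect r0 (hLg ▸ List.mem_cons_self)
        rw [hisEmpty]
        simp only [Bool.false_eq_true, if_false, hheadm]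
        -- view grid as the index grid of its own characters
        have hGrect : grid = pvMkG grid.length g2.length (pvChr grid) :=
          grid_eq_mkG grid g2.length hrect
        have hr4 : PySem.Int.mod (rot - 1) 4 = (((rot.toNat - 1) % 4 : Nat) : Int) := by
          simp only [PySem.Int.mod]
          rw [Int.fmod_eq_emod]
          norm_num
          omega
        rw [hr4]
        have hiter : pvRotA^[rot.toNat - 1] grid
            = pvRotA^[(rot.toNat - 1) % 4] grid := by
          conv_lhs => rw [hGrect]
          conv_rhs => rw [hGrect]
          exact pvRotA_mod _ _ _ _ (by omega) hLpos
        rw [hiter]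
        obtain h | h | h | h : (rot.toNat - 1) % 4 = 0 ∨ (rot.toNat - 1) % 4 = 1 ∨
            (rot.toNat - 1) % 4 = 2 ∨ (rot.toNat - 1) % 4 = 3 := by omega
        all_goals rw [h]
        · rw [if_pos (show ((0 : Nat) : Int) = 0 by norm_num)]
          rfl
        · rw [if_neg (show ¬((1 : Nat) : Int) = 0 by norm_num),
              if_pos (show ((1 : Nat) : Int) = 1 by norm_num)]
          rw [Function.iterate_one]
          conv_lhs => rw [hGrect]
          rw [pvRotA_mkG _ (by omega)]
        · rw [if_neg (show ¬((2 : Nat) : Int) = 0 by norm_num),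
              if_neg (show ¬((2 : Nat) : Int) = 1 by norm_num),
              if_pos (show ((2 : Nat) : Int) = 2 by norm_num)]
          show pvRotA (pvRotA grid) = _
          conv_lhs => rw [hGrect]
          rw [pvRotA_mkG _ (by omega), pvRotA_mkG _ hLpos]
        · rw [if_neg (show ¬((3 : Nat) : Int) = 0 by norm_num),
              if_neg (show ¬((3 : Nat) : Int) = 1 by norm_num),
              if_neg (show ¬((3 : Nat) : Int) = 2 by norm_num)]
          show pvRotA (pvRotA (pvRotA grid)) = _
          conv_lhs => rw [hGrect]
          rw [pvRotA_mkG _ (by omega), pvRotA_mkG _ hLpos, pvRotA_mkG _ (by omega)]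
          exact pvMkG_congr (fun i hi j hj => by congr 1; omega)
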